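-- pv_equiv track=rewrite | github.com/PecherskyDaniil/Logging | logchecker.py | arelogsallright
-- ===== SOURCE A (Python) =====
-- def arelogsallright(text):
--     messages=text.split("\n")
--     publishwas=False
--     publishingended=False
--     for message in messages:
--         if 'publisher_logger' in message and 'state is' in message:
--             publishwas=True
--         if 'subscriber_logger' in message and 'received message' in message and not(publishwas):
--             return False
--         else:
--             publiswas=False
--         if 'Publishing is ended' in message:
--             publishingended=True
--         if 'ERROR - No messages!' in message and not(publishingended):
--             return False
--     return True
-- ===== SOURCE B (Python) =====
-- def arelogsallright(text):
--     lines = text.split("\n")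
--
--     def first(pred):
--         return next((i for i, l in enumerate(lines) if pred(l)), None)
--
--     sub = first(lambda l: 'subscriber_logger' in l and 'received message' in l)
--     pub = first(lambda l: 'publisher_logger' in l and 'state is' in l)
--     err = first(lambda l: 'ERROR - No messages!' in l)
--     end = first(lambda l: 'Publishing is ended' in l)
--     ok1 = sub is None or (pub is not None and pub <= sub)
--     ok2 = err is None or (end is not None and end <= err)
--     return ok1 and ok2
-- ===== Notes on version B (the rewrite author's own statement) =====
-- stated objective: alternative
-- what changed: Replaces A's interleaved two-flag scan with a loop-free formulation: compute the first-occurrence index of each of the four marker lines and decide each ordering constraint by a single index comparison (publisher-state index <= first subscriber-received index, publishing-ended index <= first no-messages-error index).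
import Mathlib
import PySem

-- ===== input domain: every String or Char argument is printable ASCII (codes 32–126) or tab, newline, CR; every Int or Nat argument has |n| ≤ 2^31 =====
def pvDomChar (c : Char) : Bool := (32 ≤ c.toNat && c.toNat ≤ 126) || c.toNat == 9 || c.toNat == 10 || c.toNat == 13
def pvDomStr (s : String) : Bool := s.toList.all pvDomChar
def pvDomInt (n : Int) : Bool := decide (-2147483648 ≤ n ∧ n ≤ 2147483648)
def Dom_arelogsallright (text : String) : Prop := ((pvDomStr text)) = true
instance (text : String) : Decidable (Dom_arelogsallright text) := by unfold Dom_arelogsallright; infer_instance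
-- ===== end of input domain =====

-- B replaces A's interleaved two-flag scan by computing the first-occurrence index of each
-- marker line and deciding each ordering constraint by one index comparison (objective:
-- alternative; not faster).

-- ===== PORT A =====
-- A's single loop, one line at a time, carrying both flags; the Python's dead assignment
-- to a misspelled flag name binds a fresh unused variable and affects nothing.
def pvALoop : List String → Bool → Bool → Bool
  | [], _, _ => true
  | m :: rest, pw, pe =>
    let pw := if PySem.Str.isIn "publisher_logger" m && PySem.Str.isIn "state is" m then true else pw
    if PySem.Str.isIn "subscriber_logger" m && PySem.Str.isIn "received message" m && !pw then
      false
    else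
      let pe := if PySem.Str.isIn "Publishing is ended" m then true else pe
      if PySem.Str.isIn "ERROR - No messages!" m && !pe then false
      else pvALoop rest pw pe

def arelogsallright (text : String) : Bool :=
  pvALoop ((PySem.Str.split? text "\n").getD []) false false

-- ===== PORT B =====
-- Source B's `first(pred)` = index of the first line satisfying pred, as Lean's findIdx?.
def pvSubP (l : String) : Bool := PySem.Str.isIn "subscriber_logger" l && PySem.Str.isIn "received message" l
def pvPubP (l : String) : Bool := PySem.Str.isIn "publisher_logger" l && PySem.Str.isIn "state is" l
def pvErrP (l : String) : Bool := PySem.Str.isIn "ERROR - No messages!" l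
def pvEndP (l : String) : Bool := PySem.Str.isIn "Publishing is ended" l

-- `x is None or (y is not None and y <= x)` on optional indices.
def pvLeFirst : Option Nat → Option Nat → Bool
  | none, _ => true
  | some _, none => false
  | some i, some j => decide (j ≤ i)

def arelogsallright_alt (text : String) : Bool :=
  let lines := (PySem.Str.split? text "\n").getD []
  let sub := lines.findIdx? pvSubP
  let pub := lines.findIdx? pvPubP
  let err := lines.findIdx? pvErrP
  let fin := lines.findIdx? pvEndP
  pvLeFirst sub pub && pvLeFirst err fin

-- ===== PRECONDITION & SPEC =====
def Spec_arelogsallright (text : String) (out : Bool) : Prop := out = arelogsallright_alt text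
instance (text : String) (out : Bool) : Decidable (Spec_arelogsallright text out) := by unfold Spec_arelogsallright; infer_instance

-- ===== CLAIM (what is proved, stated in full; the proofs are below) =====
def Claim_equal_arelogsallright : Prop := ∀ (text : String), Dom_arelogsallright text → Spec_arelogsallright text (arelogsallright text)

-- ===== LEMMAS AND PROOFS =====
-- Proof-only generic one-flag scan: set the flag on `setp` lines, fail on `failp` lines
-- while the flag is still unset. A's loop is two of these run in lockstep.
def pvFlagLoop (setp failp : String → Bool) : List String → Bool → Bool
  | [], _ => true
  | m :: rest, fl =>
    let fl := if setp m then true else fl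
    if failp m && !fl then false else pvFlagLoop setp failp rest fl

theorem pvLeFirst_map (o1 o2 : Option Nat) :
    pvLeFirst (o1.map (· + 1)) (o2.map (· + 1)) = pvLeFirst o1 o2 := by
  cases o1 <;> cases o2 <;> simp [pvLeFirst]

theorem pvLeFirst_zero (o : Option Nat) : pvLeFirst (o.map (· + 1)) (some 0) = true := by
  cases o <;> simp [pvLeFirst]

theorem pvLeFirst_zero' (o : Option Nat) : pvLeFirst (some 0) (o.map (· + 1)) = false := by
  cases o <;> simp [pvLeFirst]

theorem pvLeFirst_self0 : pvLeFirst (some 0) (some 0) = true := rfl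

theorem pvFlagLoop_eq (setp failp : String → Bool) (lines : List String) :
    ∀ fl, pvFlagLoop setp failp lines fl =
      (fl || pvLeFirst (lines.findIdx? failp) (lines.findIdx? setp)) := by
  induction lines with
  | nil => intro fl; simp [pvFlagLoop, pvLeFirst]
  | cons m rest ih =>
    intro fl
    cases hs : setp m <;> cases hf : failp m <;> cases fl <;>
      simp [pvFlagLoop, List.findIdx?_cons, hs, hf, ih, pvLeFirst_map,
        pvLeFirst_zero, pvLeFirst_zero', pvLeFirst_self0]

theorem pvALoop_eq (lines : List String) :
    ∀ pw pe, pvALoop lines pw pe =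
      (pvFlagLoop pvPubP pvSubP lines pw && pvFlagLoop pvEndP pvErrP lines pe) := by
  induction lines with
  | nil => intro pw pe; rfl
  | cons m rest ih =>
    intro pw pe
    simp only [pvALoop, pvFlagLoop, pvSubP, pvPubP, pvErrP, pvEndP, Bool.and_assoc]
    split_ifs <;> simp [ih]

-- ===== VERDICT (by name: the statement is the Claim_ definition above) =====
theorem arelogsallright_spec : Claim_equal_arelogsallright := by
  intro text _
  unfold Spec_arelogsallright arelogsallright arelogsallright_alt
  rw [pvALoop_eq]
  rw [pvFlagLoop_eq, pvFlagLoop_eq]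
  simp
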